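-- pv_equiv track=rewrite | github.com/Nocturnale-Romanum/website | home/util.py | remove_rsigns_from_gabc_element
-- ===== SOURCE A (Python) =====
-- def remove_rsigns_from_gabc_element(gabc_element):
--   # this does what it says, however, it does not remove advancedly placed episemata like _[oh:h].
--   # we will add support for those if needed.
--   l = gabc_element.split('|')
--   gabc = l[::2]
--   nabc = l[1::2]
--   ngabc = []
--   for element in gabc:
--     for x in ["'", "_0", "_1", "_", "."]:
--       element = element.replace(x, '')
--     ngabc.append(element)
--   # merging ngabc and nabc is delicate, one must manage the case where the last gabc segment has no nabc
--   if len(gabc) == len(nabc):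
--     return "|".join([x for y in zip(ngabc, nabc) for x in y])
--   else: # this is the case where len(gabc) = len(nabc) + 1
--     result_without_tail = "|".join([x for y in zip(ngabc, nabc) for x in y])
--     if result_without_tail == "":
--       return ngabc[0] # the only element in ngabc, in fact
--     else:
--       return result_without_tail + '|' + ngabc[-1]
-- ===== SOURCE B (Python) =====
-- def _strip_rsigns(segment):
--     return (segment.replace("'", "")
--                    .replace("_0", "")
--                    .replace("_1", "")
--                    .replace("_", "")
--                    .replace(".", ""))
--
-- def remove_rsigns_from_gabc_element(gabc_element):
--     # gabc segments sit at even positions, nabc segments at odd positions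
--     return '|'.join(_strip_rsigns(seg) if i % 2 == 0 else seg
--                     for i, seg in enumerate(gabc_element.split('|')))
-- ===== Notes on version B (the rewrite author's own statement) =====
-- stated objective: simpler
-- what changed: Replaces A's two-sublist split (l[::2]/l[1::2]), zip-flatten reconstruction and length/empty-tail special-casing with one parity-based pass over enumerate(split), stripping even-indexed segments and rejoining.
import Mathlib
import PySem

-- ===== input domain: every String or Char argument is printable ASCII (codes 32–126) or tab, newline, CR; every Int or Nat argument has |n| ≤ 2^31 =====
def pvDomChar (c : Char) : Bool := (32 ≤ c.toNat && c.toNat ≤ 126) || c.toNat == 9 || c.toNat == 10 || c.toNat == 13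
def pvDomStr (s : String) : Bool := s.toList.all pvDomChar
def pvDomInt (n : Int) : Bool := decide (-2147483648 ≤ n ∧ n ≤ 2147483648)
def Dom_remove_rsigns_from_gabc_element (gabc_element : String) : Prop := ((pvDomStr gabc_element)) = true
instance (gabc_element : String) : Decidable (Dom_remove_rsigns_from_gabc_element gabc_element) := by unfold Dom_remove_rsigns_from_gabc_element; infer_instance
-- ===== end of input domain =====

-- B replaces A's two-sublist split / zip-flatten reconstruction / tail special-casing with a
-- single parity-indexed pass over the split segments (objective: simpler).
-- String operations are ported on the List Char side via PySem.Chars (the exact definitions behind PySem.Str).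

-- ===== PORT A =====
-- the inner 'for x in [...]: element = element.replace(x, "")' loop of A
def pvStripA (element : List Char) : List Char :=
  [['\''], ['_','0'], ['_','1'], ['_'], ['.']].foldl
    (fun element x => PySem.Chars.replace element x []) element

def pvACore (l : List (List Char)) : List Char :=
  let gabc := (PySem.List.slice? l none none 2).getD []        -- l[::2]  (step 2 ≠ 0: never none)
  let nabc := (PySem.List.slice? l (some 1) none 2).getD []    -- l[1::2]
  let ngabc := gabc.foldl (fun acc element => acc ++ [pvStripA element]) []
  if gabc.length = nabc.length then
    PySem.Chars.join ['|'] ((ngabc.zip nabc).flatMap (fun y => [y.1, y.2]))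
  else
    let result_without_tail := PySem.Chars.join ['|'] ((ngabc.zip nabc).flatMap (fun y => [y.1, y.2]))
    if result_without_tail = [] then
      (PySem.List.pyGet? ngabc 0).getD []                      -- ngabc[0]; ngabc is never empty here
    else
      result_without_tail ++ ['|'] ++ (PySem.List.pyGet? ngabc (-1)).getD []   -- ngabc[-1]

def remove_rsigns_from_gabc_element (gabc_element : String) : String :=
  match PySem.Chars.split? gabc_element.toList ['|'] with      -- gabc_element.split('|')
  | some l => String.ofList (pvACore l)
  | none => ""                                                 -- unreachable: the separator '|' is nonempty

-- ===== PORT B =====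
-- B's helper _strip_rsigns: a plain chain of replace calls
def pvStripB (segment : List Char) : List Char :=
  PySem.Chars.replace (PySem.Chars.replace (PySem.Chars.replace (PySem.Chars.replace
    (PySem.Chars.replace segment ['\''] []) ['_','0'] []) ['_','1'] []) ['_'] []) ['.'] []

def pvBCore (segs : List (List Char)) : List Char :=
  PySem.Chars.join ['|']
    ((PySem.List.enumerate segs).map
      (fun p => if PySem.Int.mod p.1 2 = 0 then pvStripB p.2 else p.2))

def remove_rsigns_from_gabc_element_alt (gabc_element : String) : String :=
  match PySem.Chars.split? gabc_element.toList ['|'] with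
  | some segs => String.ofList (pvBCore segs)
  | none => ""

-- ===== PRECONDITION & SPEC =====
def Spec_remove_rsigns_from_gabc_element (gabc_element : String) (out : String) : Prop := out = remove_rsigns_from_gabc_element_alt gabc_element
instance (gabc_element : String) (out : String) : Decidable (Spec_remove_rsigns_from_gabc_element gabc_element out) := by unfold Spec_remove_rsigns_from_gabc_element; infer_instance

-- ===== CLAIM (what is proved, stated in full; the proofs are below) =====
def Claim_equal_remove_rsigns_from_gabc_element : Prop := ∀ (gabc_element : String), Dom_remove_rsigns_from_gabc_element gabc_element → Spec_remove_rsigns_from_gabc_element gabc_element (remove_rsigns_from_gabc_element gabc_element)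

-- ===== LEMMAS AND PROOFS =====

-- the two strip helpers compute the same chain of replaces
theorem stripA_eq_stripB (e : List Char) : pvStripA e = pvStripB e := rfl

-- l[::2] / l[1::2] never raise for step 2
theorem slice2_isSome {α : Type} (l : List α) (s? : Option Int) :
    ∃ ys, PySem.List.slice? l s? none 2 = some ys := by
  simp [PySem.List.slice?]

-- recurrences of the step-2 slices
theorem slice2_evens_cons_cons {α : Type} (a b : α) (t : List α) :
    PySem.List.slice? (a::b::t) none none 2 = (PySem.List.slice? t none none 2).map (a :: ·) := by
  simp only [PySem.List.slice?, PySem.List.sliceIndices]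
  norm_num
  have hc : (if (0:Int) ≤ (t.length:Int) + 1 then (((t.length:Int) + 1 + 1 + 2 - 1) / 2).toNat else 0)
      = (if 0 < t.length then (((t.length:Int) + 2 - 1) / 2).toNat else 0) + 1 := by
    split_ifs <;> omega
  rw [hc, List.range_succ_eq_map, List.filterMap_cons, List.filterMap_map]
  simp only [Nat.cast_zero, mul_zero, Int.toNat_zero, List.getElem?_cons_zero]
  congr 1

theorem slice2_odds_cons_cons {α : Type} (a b : α) (t : List α) :
    PySem.List.slice? (a::b::t) (some 1) none 2 = (PySem.List.slice? t (some 1) none 2).map (b :: ·) := by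
  simp only [PySem.List.slice?, PySem.List.sliceIndices]
  norm_num
  cases t with
  | nil =>
    simp
  | cons c t' =>
    simp only [List.length_cons, Nat.cast_add, Nat.cast_one]
    have h1 : min (1:Int) ((t'.length:Int) + 1 + 1 + 1) = 1 := by omega
    have h2 : min (1:Int) ((t'.length:Int) + 1) = 1 := by omega
    rw [h1, h2]
    have hc : (((t'.length:Int) + 1 + 1 + 1 - 1 + 2 - 1) / 2).toNat
        = (if 1 < t'.length + 1 then (((t'.length:Int) + 1 - 1 + 2 - 1) / 2).toNat else 0) + 1 := by
      split_ifs <;> omega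
    rw [hc, List.range_succ_eq_map, List.filterMap_cons, List.filterMap_map]
    have h0 : ((1:Int) + 2 * ((0:Nat):Int)).toNat = 1 := by norm_num
    simp only [h0, List.getElem?_cons_succ, List.getElem?_cons_zero]
    congr 1

theorem slice2_evens_single {α : Type} (a : α) : PySem.List.slice? [a] none none 2 = some [a] := by
  simp [PySem.List.slice?, PySem.List.sliceIndices]
theorem slice2_odds_single {α : Type} (a : α) : PySem.List.slice? [a] (some 1) none 2 = some [] := by
  simp [PySem.List.slice?, PySem.List.sliceIndices]

-- negative index -1 is the last element
theorem pyGet?_neg_one {α : Type} (xs : List α) (h : xs ≠ []) :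
    PySem.List.pyGet? xs (-1) = xs.getLast? := by
  have h0 : 0 < xs.length := List.length_pos_iff.mpr h
  rw [List.getLast?_eq_getElem?]
  simp only [PySem.List.pyGet?, PySem.List.pyIdx?]
  norm_num
  rw [if_pos (show 1 ≤ xs.length by omega)]
  simp

-- split() never returns the empty list
theorem splitOn_go_ne_nil (sep : List Char) : ∀ (fuel : Nat) (l cur : List Char) (acc : List (List Char)),
    PySem.Chars.splitOn.go sep fuel l cur acc ≠ [] := by
  intro fuel
  induction fuel with
  | zero => intro l cur acc; simp [PySem.Chars.splitOn.go]
  | succ n ih =>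
    intro l cur acc
    cases l with
    | nil => simp [PySem.Chars.splitOn.go]
    | cons c rest =>
      rw [PySem.Chars.splitOn.go]
      split
      · exact ih _ _ _
      · exact ih _ _ _

theorem splitOn_ne_nil (s sep : List Char) : PySem.Chars.splitOn s sep ≠ [] :=
  splitOn_go_ne_nil sep _ s [] []

-- parity of the running index is all the map over enumerate reads
theorem enumerate_parity_shift (t : List (List Char)) : ∀ (k : Int),
    ((PySem.List.enumerate t (k+2)).map (fun p => if PySem.Int.mod p.1 2 = 0 then pvStripB p.2 else p.2))
      = ((PySem.List.enumerate t k).map (fun p => if PySem.Int.mod p.1 2 = 0 then pvStripB p.2 else p.2)) := by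
  induction t with
  | nil => intro k; simp [PySem.List.enumerate]
  | cons x xs ih =>
    intro k
    rw [PySem.List.enumerate_cons, PySem.List.enumerate_cons]
    have hmod : PySem.Int.mod (k+2) 2 = PySem.Int.mod k 2 := by
      rw [PySem.Int.mod_eq_emod_of_pos (by norm_num), PySem.Int.mod_eq_emod_of_pos (by norm_num)]
      omega
    have : k + 2 + 1 = (k + 1) + 2 := by ring
    simp only [List.map_cons, hmod, this, ih]

-- ----- shapes of the B core -----
theorem BCore_single (a : List Char) : pvBCore [a] = pvStripB a := by
  simp [pvBCore, PySem.List.enumerate, PySem.Chars.join_singleton]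

theorem BCore_pair (a b : List Char) : pvBCore [a, b] = pvStripB a ++ ['|'] ++ b := by
  simp [pvBCore, PySem.List.enumerate, PySem.Chars.join_cons_cons, PySem.Chars.join_singleton]

theorem BCore_cons_cons (a b : List Char) (t : List (List Char)) (ht : t ≠ []) :
    pvBCore (a :: b :: t) = pvStripB a ++ ['|'] ++ b ++ ['|'] ++ pvBCore t := by
  obtain ⟨c, t', rfl⟩ := List.exists_cons_of_ne_nil ht
  unfold pvBCore
  rw [PySem.List.enumerate_cons, PySem.List.enumerate_cons, List.map_cons, List.map_cons,
      show (0:Int) + 1 + 1 = 0 + 2 by ring, enumerate_parity_shift]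
  rw [PySem.List.enumerate_cons, List.map_cons]
  rw [PySem.Chars.join_cons_cons, PySem.Chars.join_cons_cons]
  simp [List.append_assoc]

-- ----- shapes of the A core -----

-- the A core, with the two slices and the foldl-append loop rewritten away
theorem ACore_body (l et ot : List (List Char))
    (he : PySem.List.slice? l none none 2 = some et)
    (ho : PySem.List.slice? l (some 1) none 2 = some ot) :
    pvACore l =
      (if et.length = ot.length then
        PySem.Chars.join ['|'] (((et.map pvStripA).zip ot).flatMap (fun y => [y.1, y.2]))
      else if PySem.Chars.join ['|'] (((et.map pvStripA).zip ot).flatMap (fun y => [y.1, y.2])) = [] then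
        (PySem.List.pyGet? (et.map pvStripA) 0).getD []
      else
        PySem.Chars.join ['|'] (((et.map pvStripA).zip ot).flatMap (fun y => [y.1, y.2])) ++ ['|'] ++
          (PySem.List.pyGet? (et.map pvStripA) (-1)).getD []) := by
  simp only [pvACore, he, ho, Option.getD_some, PySem.List.foldl_append_singleton_eq_map,
    List.nil_append]

theorem slice2_evens_nil : PySem.List.slice? ([] : List (List Char)) none none 2 = some [] := by
  simp [PySem.List.slice?, PySem.List.sliceIndices]
theorem slice2_odds_nil : PySem.List.slice? ([] : List (List Char)) (some 1) none 2 = some [] := by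
  simp [PySem.List.slice?, PySem.List.sliceIndices]

-- on a nonempty list the even slice is nonempty
theorem evens_shape : ∀ (t : List (List Char)), t ≠ [] → ∀ et,
    PySem.List.slice? t none none 2 = some et → et ≠ []
  | [], h, _, _ => absurd rfl h
  | [c], _, et, he => by rw [slice2_evens_single] at he; cases he; simp
  | c :: d :: t', _, et, he => by
      rw [slice2_evens_cons_cons] at he
      obtain ⟨ys, _, rfl⟩ := Option.map_eq_some_iff.mp he
      simp

-- an empty odd slice of a nonempty list means a singleton list
theorem odds_nil_shape : ∀ (t : List (List Char)), t ≠ [] →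
    PySem.List.slice? t (some 1) none 2 = some [] → ∃ c, t = [c]
  | [], h, _ => absurd rfl h
  | [c], _, _ => ⟨c, rfl⟩
  | c :: d :: t', _, ho => by
      rw [slice2_odds_cons_cons] at ho
      obtain ⟨ys, _, h⟩ := Option.map_eq_some_iff.mp ho
      simp at h

theorem ACore_single (a : List Char) : pvACore [a] = pvStripA a := by
  rw [ACore_body [a] [a] [] (slice2_evens_single a) (slice2_odds_single a)]
  simp [PySem.Chars.join_nil, PySem.List.pyGet?, PySem.List.pyIdx?]

theorem ACore_pair (a b : List Char) : pvACore [a, b] = pvStripA a ++ ['|'] ++ b := by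
  have he : PySem.List.slice? [a, b] none none 2 = some [a] := by
    rw [slice2_evens_cons_cons, slice2_evens_nil]; rfl
  have ho : PySem.List.slice? [a, b] (some 1) none 2 = some [b] := by
    rw [slice2_odds_cons_cons, slice2_odds_nil]; rfl
  rw [ACore_body [a, b] [a] [b] he ho]
  simp [PySem.Chars.join_cons_cons, PySem.Chars.join_singleton]

theorem ACore_cons_cons (a b : List Char) (t : List (List Char)) (ht : t ≠ []) :
    pvACore (a :: b :: t) = pvStripA a ++ ['|'] ++ b ++ ['|'] ++ pvACore t := by
  obtain ⟨et, het⟩ := slice2_isSome t none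
  obtain ⟨ot, hot⟩ := slice2_isSome t (some 1)
  have hetne : et ≠ [] := evens_shape t ht et het
  obtain ⟨fc, et', rfl⟩ := List.exists_cons_of_ne_nil hetne
  have he : PySem.List.slice? (a :: b :: t) none none 2 = some (a :: fc :: et') := by
    rw [slice2_evens_cons_cons, het]; rfl
  have ho : PySem.List.slice? (a :: b :: t) (some 1) none 2 = some (b :: ot) := by
    rw [slice2_odds_cons_cons, hot]; rfl
  rw [ACore_body _ _ _ he ho, ACore_body _ _ _ het hot]
  by_cases hl : (fc :: et').length = ot.length
  · rw [if_pos (by simpa using hl), if_pos hl]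
    obtain ⟨o, ot', rfl⟩ := List.exists_cons_of_ne_nil (by
      intro h; subst h; simp at hl : ot ≠ [])
    simp only [List.map_cons, List.zip_cons_cons, List.flatMap_cons, List.cons_append, List.nil_append]
    rw [PySem.Chars.join_cons_cons, PySem.Chars.join_cons_cons]
    simp [List.append_assoc]
  · rw [if_neg (by simpa using hl), if_neg hl]
    simp only [List.map_cons, List.zip_cons_cons, List.flatMap_cons, List.cons_append, List.nil_append]
    cases ot with
    | nil =>
      obtain ⟨c, rfl⟩ := odds_nil_shape t ht hot
      rw [slice2_evens_single] at het
      cases het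
      simp only [List.zip_nil_right, List.flatMap_nil]
      rw [if_neg (by
        rw [PySem.Chars.join_cons_cons, PySem.Chars.join_singleton]
        simp)]
      rw [PySem.Chars.join_cons_cons, PySem.Chars.join_singleton, PySem.Chars.join_nil]
      rw [if_pos rfl]
      rw [pyGet?_neg_one _ (by simp)]
      simp [PySem.List.pyGet?, PySem.List.pyIdx?, List.append_assoc]
    | cons o ot' =>
      simp only [List.zip_cons_cons, List.flatMap_cons, List.cons_append, List.nil_append]
      rw [if_neg (by
        rw [PySem.Chars.join_cons_cons]
        simp)]
      rw [if_neg (by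
        rw [PySem.Chars.join_cons_cons]
        simp)]
      rw [pyGet?_neg_one _ (by simp), pyGet?_neg_one _ (by simp)]
      rw [List.getLast?_cons_cons]
      rw [PySem.Chars.join_cons_cons, PySem.Chars.join_cons_cons, PySem.Chars.join_cons_cons]
      simp [List.append_assoc]

-- ----- the two cores agree on every nonempty list -----
theorem core_eq : ∀ (l : List (List Char)), l ≠ [] → pvACore l = pvBCore l
  | [a], _ => by rw [ACore_single, BCore_single, stripA_eq_stripB]
  | [a, b], _ => by rw [ACore_pair, BCore_pair, stripA_eq_stripB]
  | a :: b :: c :: t, _ => by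
      rw [ACore_cons_cons a b (c :: t) (by simp), BCore_cons_cons a b (c :: t) (by simp),
          stripA_eq_stripB, core_eq (c :: t) (by simp)]

-- ===== VERDICT (by name: the statement is the Claim_ definition above) =====
theorem remove_rsigns_from_gabc_element_spec : Claim_equal_remove_rsigns_from_gabc_element := by
  intro s _
  unfold Spec_remove_rsigns_from_gabc_element
  unfold remove_rsigns_from_gabc_element remove_rsigns_from_gabc_element_alt
  have hsplit : PySem.Chars.split? s.toList ['|'] = some (PySem.Chars.splitOn s.toList ['|']) := by
    simp [PySem.Chars.split?]
  rw [hsplit]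
  dsimp only
  rw [core_eq _ (splitOn_ne_nil s.toList ['|'])]
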